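-- pv_equiv track=rewrite | github.com/arathyrose/iss-a4 | app/vernam.py | generate_all_pairs
-- ===== SOURCE A (Python) =====
-- PLAIN_TEXT_LEN = 8
--
-- def resize_key(key):
--     key = (key * (PLAIN_TEXT_LEN//len(key) + 4))[:PLAIN_TEXT_LEN]
--     return key
--
-- def encrypt(plaintext, key, encryption_technique):
--     key = resize_key(key)
--     cipher_text = ""
--     for i in range(PLAIN_TEXT_LEN):
--         if(encryption_technique[i] == "0"):
--             cipher_text += str(int(plaintext[i]) ^ int(key[i]))
--         else:
--             cipher_text += str(int(plaintext[i]) & int(key[i]))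
--     return cipher_text
--
-- def next_binary_num(binary_num):
--     index = 0
--     length = len(binary_num)
--     # replace the first "0" with "1"
--     if (index < length) and (binary_num[index] == "0"):
--         binary_num = "1" + binary_num[1:]
--         return binary_num
--     # toggle all 1's
--     while (index < length) and (binary_num[index] == "1"):
--         temp_binary_num = ""
--         if (index > 0):
--             temp_binary_num += binary_num[:index]
--         temp_binary_num += "0"
--         if (index+1 < length):
--             temp_binary_num += binary_num[index+1:]
--         binary_num = temp_binary_num
--         index += 1
--     # toggle next 0
--     if (index < length):
--         temp_binary_num = ""
--         temp_binary_num += binary_num[:index] + "1"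
--         if (index+1 < length):
--             temp_binary_num += binary_num[index+1:]
--         binary_num = temp_binary_num
--     return binary_num
--
-- def generate_all_pairs(key, encryption_technique):
--     key = resize_key(key)
--     all_tuples = ""
--     binary_num = "00000000"
--     possible_plain_text = 2**PLAIN_TEXT_LEN
--     for _ in range(possible_plain_text):
--         binary_num = next_binary_num(binary_num)
--         crypted_text = encrypt(binary_num, key, encryption_technique)
--         all_tuples += (binary_num + " , " + crypted_text + "\n")
--     return all_tuples
-- ===== SOURCE B (Python) =====
-- PLAIN_TEXT_LEN = 8
--
-- def generate_all_pairs(key, encryption_technique):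
--     r = (key * (PLAIN_TEXT_LEN // len(key) + 4))[:PLAIN_TEXT_LEN]
--     lines = []
--     for i in range(256):
--         p = format((i + 1) % 256, '08b')[::-1]
--         c = ""
--         for j in range(PLAIN_TEXT_LEN):
--             if encryption_technique[j] == "0":
--                 c += str(int(p[j]) ^ int(r[j]))
--             else:
--                 c += str(int(p[j]) & int(r[j]))
--         lines.append(p + " , " + c + "\n")
--     return "".join(lines)
-- ===== Notes on version B (the rewrite author's own statement) =====
-- stated objective: simpler
-- what changed: B replaces A's ripple-carry string incrementer (next_binary_num) and per-call key resizing with a direct integer-to-little-endian-binary conversion format((i+1)%256,'08b')[::-1] per index, resizes the key once, and joins the collected lines instead of += concatenation.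
import Mathlib
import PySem

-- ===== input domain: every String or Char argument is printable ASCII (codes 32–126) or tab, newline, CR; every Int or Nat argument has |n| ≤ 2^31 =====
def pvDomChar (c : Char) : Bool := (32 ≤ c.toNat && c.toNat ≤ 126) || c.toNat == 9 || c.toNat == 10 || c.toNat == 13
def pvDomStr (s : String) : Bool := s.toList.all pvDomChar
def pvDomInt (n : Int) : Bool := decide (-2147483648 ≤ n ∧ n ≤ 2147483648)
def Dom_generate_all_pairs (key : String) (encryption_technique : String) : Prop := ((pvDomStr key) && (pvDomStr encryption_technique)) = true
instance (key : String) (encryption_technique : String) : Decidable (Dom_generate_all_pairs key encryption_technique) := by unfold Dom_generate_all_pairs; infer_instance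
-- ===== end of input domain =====

-- B replaces A's ripple-carry string incrementer (and the per-call key resizing and += accumulation)
-- with a direct integer→little-endian-binary conversion per index plus one join; return values agree on Pre_.

-- int(s[i]) for a 1-character string, shared primitive of both ports (Python raises where getD fires; Pre_ excludes that)
def pvIntAt (s : List Char) (i : Int) : Int :=
  (PySem.Int.ofChars? [(PySem.List.pyGet? s i).getD ' ']).getD 0

-- s[i] as a char (Pre_ excludes the out-of-range case where Python raises)
def pvCharAt (s : List Char) (i : Int) : Char := (PySem.List.pyGet? s i).getD ' '

-- ===== PORT A =====
-- key = (key * (8//len(key) + 4))[:8]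
def resize_keyA (key : List Char) : List Char :=
  PySem.List.slice (PySem.List.pyRepeat key (PySem.Int.floordiv 8 (key.length : Int) + 4)) none (some 8)

-- encrypt(plaintext, key, encryption_technique)
def encryptA (plaintext : List Char) (key : List Char) (et : List Char) : List Char :=
  let key := resize_keyA key
  (PySem.List.pyRange 0 8 1).foldl (fun ct i =>
    if pvCharAt et i == '0'
    then ct ++ PySem.Int.toChars (PySem.Int.bxor (pvIntAt plaintext i) (pvIntAt key i))
    else ct ++ PySem.Int.toChars (PySem.Int.band (pvIntAt plaintext i) (pvIntAt key i))) []

-- the 'while (index < length) and (binary_num[index] == "1")' loop; fuel = length - index bounds the iterations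
def nextWhileA (fuel : Nat) (bn : List Char) (index : Nat) (length : Nat) : List Char × Nat :=
  match fuel with
  | 0 => (bn, index)
  | f + 1 =>
    if index < length && (pvCharAt bn (index : Int) == '1') then
      let bn' := (if 0 < index then PySem.List.slice bn none (some (index : Int)) else []) ++ ['0'] ++
                 (if index + 1 < length then PySem.List.slice bn (some ((index : Int) + 1)) none else [])
      nextWhileA f bn' (index + 1) length
    else (bn, index)

-- next_binary_num(binary_num)
def next_binary_numA (bn : List Char) : List Char :=
  let length := bn.length
  if 0 < length && (pvCharAt bn 0 == '0') then ['1'] ++ PySem.List.slice bn (some 1) none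
  else
    let r := nextWhileA length bn 0 length
    if r.2 < length then
      (PySem.List.slice r.1 none (some (r.2 : Int)) ++ ['1']) ++
      (if r.2 + 1 < length then PySem.List.slice r.1 (some ((r.2 : Int) + 1)) none else [])
    else r.1

def generate_all_pairs (key : String) (encryption_technique : String) : String :=
  let k := resize_keyA key.toList
  String.ofList ((PySem.List.pyRange 0 256 1).foldl (fun (st : List Char × List Char) _ =>
      let bn := next_binary_numA st.2
      (st.1 ++ (bn ++ (" , ".toList ++ (encryptA bn k encryption_technique.toList ++ ['\n']))), bn))
    ([], "00000000".toList)).1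

-- ===== PORT B =====
-- format(n, '08b'): the 8 binary digits of n, most significant first (n here is always in [0, 256))
def fmt8B (n : Int) : List Char :=
  (List.range 8).map (fun j => if PySem.Int.mod (n >>> (7 - j)) 2 == 1 then '1' else '0')

-- the inner per-position encryption loop of B (same body as A's encrypt, but on the pre-resized key)
def cipherB (p : List Char) (r : List Char) (et : List Char) : List Char :=
  (PySem.List.pyRange 0 8 1).foldl (fun ct i =>
    if pvCharAt et i == '0'
    then ct ++ PySem.Int.toChars (PySem.Int.bxor (pvIntAt p i) (pvIntAt r i))
    else ct ++ PySem.Int.toChars (PySem.Int.band (pvIntAt p i) (pvIntAt r i))) []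

def generate_all_pairs_alt (key : String) (encryption_technique : String) : String :=
  let r := PySem.List.slice (PySem.List.pyRepeat key.toList (PySem.Int.floordiv 8 (key.toList.length : Int) + 4)) none (some 8)
  let lines := (PySem.List.pyRange 0 256 1).foldl (fun acc i =>
      let p := (fmt8B (PySem.Int.mod (i + 1) 256)).reverse
      acc ++ [p ++ (" , ".toList ++ (cipherB p r encryption_technique.toList ++ ['\n']))]) []
  String.ofList (PySem.Chars.join [] lines)

-- ===== PRECONDITION & SPEC =====
-- Pre_ excludes exactly where the Python A raises: empty key (ZeroDivisionError), an encryption_technique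
-- shorter than 8 (IndexError), and a key whose first 8 cyclic characters are not all digits (ValueError in int()).
def Pre_generate_all_pairs (key : String) (encryption_technique : String) : Prop :=
  key.toList ≠ [] ∧ 8 ≤ encryption_technique.toList.length ∧
  ∀ i < 8, ((key.toList[i % key.toList.length]?).getD ' ').isDigit
instance (key : String) (encryption_technique : String) : Decidable (Pre_generate_all_pairs key encryption_technique) := by
  unfold Pre_generate_all_pairs; infer_instance
def pvWitness_generate_all_pairs : String × String := ("1", "01010101")
def Spec_generate_all_pairs (key : String) (encryption_technique : String) (out : String) : Prop := out = generate_all_pairs_alt key encryption_technique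
instance (key : String) (encryption_technique : String) (out : String) : Decidable (Spec_generate_all_pairs key encryption_technique out) := by unfold Spec_generate_all_pairs; infer_instance

-- ===== CLAIM (what is proved, stated in full; the proofs are below) =====
def Claim_equal_generate_all_pairs : Prop := ∀ (key : String) (encryption_technique : String), Dom_generate_all_pairs key encryption_technique → Pre_generate_all_pairs key encryption_technique → Spec_generate_all_pairs key encryption_technique (generate_all_pairs key encryption_technique)

-- ===== LEMMAS AND PROOFS =====

-- the little-endian 8-bit string of n, as B builds it
def leS (n : Nat) : List Char := (fmt8B (n : Int)).reverse

-- one output line, parameterised by the (once-resized) key and technique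
def lineA (k e : List Char) (n : Nat) : List Char :=
  leS n ++ (" , ".toList ++ (encryptA (leS n) k e ++ ['\n']))

lemma join_nil_flatten (l : List (List Char)) : PySem.Chars.join [] l = l.flatten := by
  simp only [PySem.Chars.join, List.intercalate]
  induction l with
  | nil => rfl
  | cons a t ih =>
    cases t
    · simp_all [List.intersperse]
    · simp_all [List.intersperse]

lemma length_pyRepeatL (xs : List Char) (n : Int) :
    (PySem.List.pyRepeat xs n).length = n.toNat * xs.length := by
  simp [PySem.List.pyRepeat, List.length_flatten, List.map_replicate, List.sum_replicate,
    smul_eq_mul]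

lemma slice8 (xs : List Char) : PySem.List.slice xs none (some 8) = xs.take 8 := by
  rw [PySem.List.slice_to xs (by norm_num)]
  rfl

lemma resize_len (k : List Char) (hk : k ≠ []) : (resize_keyA k).length = 8 := by
  have hL : 1 ≤ k.length := List.length_pos_iff.mpr hk
  unfold resize_keyA
  rw [slice8, List.length_take, length_pyRepeatL]
  have hcast : PySem.Int.floordiv 8 (k.length : Int) + 4 = ((8 / k.length + 4 : Nat) : Int) := by
    have h := PySem.Int.floordiv_natCast 8 k.length
    push_cast at h ⊢
    omega
  rw [hcast]
  have h8 : 8 ≤ (8 / k.length + 4) * k.length := by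
    rcases Nat.lt_or_ge k.length 2 with h | h
    · interval_cases hL' : k.length
      omega
    · calc 8 ≤ 4 * k.length := by omega
        _ ≤ (8 / k.length + 4) * k.length := Nat.mul_le_mul_right _ (Nat.le_add_left 4 _)
  simp only [Int.toNat_natCast]
  omega

lemma resize_of_len8 (k : List Char) (h8 : k.length = 8) : resize_keyA k = k := by
  unfold resize_keyA
  rw [h8]
  have h5 : PySem.Int.floordiv 8 ((8 : Nat) : Int) + 4 = 5 := by decide
  rw [h5, slice8]
  have h40 : (List.replicate (Int.toNat 5) k).flatten = k ++ (List.replicate 4 k).flatten := by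
    show (List.replicate 5 k).flatten = _
    rw [List.replicate_succ, List.flatten_cons]
  show ((List.replicate (Int.toNat 5) k).flatten).take 8 = k
  rw [h40, ← h8, List.take_left]

lemma resize_idem (k : List Char) (hk : k ≠ []) : resize_keyA (resize_keyA k) = resize_keyA k :=
  resize_of_len8 _ (resize_len k hk)

lemma encryptA_eq_cipherB (p k e : List Char) : encryptA p k e = cipherB p (resize_keyA k) e := rfl

set_option maxRecDepth 8192 in
set_option maxHeartbeats 4000000 in
lemma step256_all :
    ((List.range 256).all (fun n => next_binary_numA (leS n) == leS ((n + 1) % 256))) = true := by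
  decide

lemma step256 (n : Nat) (hn : n < 256) : next_binary_numA (leS n) = leS ((n + 1) % 256) := by
  have h := List.all_eq_true.mp step256_all n (List.mem_range.mpr hn)
  exact eq_of_beq h

lemma loopA (k e : List Char) :
    ∀ (l : List Int) (n : Nat) (acc : List Char), n < 256 →
    (l.foldl (fun (st : List Char × List Char) _ =>
        let bn := next_binary_numA st.2
        (st.1 ++ (bn ++ (" , ".toList ++ (encryptA bn k e ++ ['\n']))), bn))
      (acc, leS n))
    = (acc ++ ((List.range l.length).map (fun j => lineA k e ((n + j + 1) % 256))).flatten,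
       leS ((n + l.length) % 256)) := by
  intro l
  induction l with
  | nil =>
    intro n acc hn
    simp [Nat.mod_eq_of_lt hn]
  | cons x t ih =>
    intro n acc hn
    simp only [List.foldl_cons]
    show List.foldl _
      (acc ++ (next_binary_numA (leS n) ++ (" , ".toList ++ (encryptA (next_binary_numA (leS n)) k e ++ ['\n']))),
       next_binary_numA (leS n)) t = _
    rw [step256 n hn, ih ((n + 1) % 256) _ (Nat.mod_lt _ (by norm_num))]
    simp only [List.length_cons]
    refine Prod.ext ?_ ?_
    · show (acc ++ (leS ((n + 1) % 256) ++ (" , ".toList ++ (encryptA (leS ((n + 1) % 256)) k e ++ ['\n'])))) ++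
        ((List.range t.length).map (fun j => lineA k e (((n + 1) % 256 + j + 1) % 256))).flatten
        = acc ++ ((List.range (t.length + 1)).map (fun j => lineA k e ((n + j + 1) % 256))).flatten
      rw [List.range_succ_eq_map, List.map_cons, List.map_map, List.flatten_cons, List.append_assoc]
      have hmap : (List.map (fun j => lineA k e (((n + 1) % 256 + j + 1) % 256)) (List.range t.length)).flatten =
          (List.map ((fun j => lineA k e ((n + j + 1) % 256)) ∘ Nat.succ) (List.range t.length)).flatten :=
        congrArg List.flatten (List.map_congr_left (fun j _ => congrArg (lineA k e) (by omega)))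
      have h01 : n + 0 + 1 = n + 1 := by omega
      rw [hmap, h01]
      simp only [lineA, List.append_assoc]
    · exact congrArg leS (by omega)

lemma string_toList_00000000 : "00000000".toList = leS 0 := by decide

lemma pyRange256_len : (PySem.List.pyRange 0 256 1).length = 256 := by
  rw [PySem.List.length_pyRange_one]
  decide

lemma mod_cast_helper (j : Nat) :
    PySem.Int.mod (0 + (j : Int) + 1) 256 = (((j + 1) % 256 : Nat) : Int) := by
  have e1 : (0 + (j : Int) + 1) = ((j + 1 : Nat) : Int) := by push_cast; ring
  have e2 : (256 : Int) = ((256 : Nat) : Int) := by norm_num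
  rw [e1, e2, PySem.Int.mod_natCast]

-- ===== VERDICT (by name: the statement is the Claim_ definition above) =====
theorem generate_all_pairs_spec : Claim_equal_generate_all_pairs := by
  intro key et _hdom hpre
  obtain ⟨hk, _hlen, _hdig⟩ := hpre
  show generate_all_pairs key et = generate_all_pairs_alt key et
  simp only [generate_all_pairs, generate_all_pairs_alt]
  rw [PySem.List.foldl_append_singleton_eq_map
    (f := fun i => (fmt8B (PySem.Int.mod (i + 1) 256)).reverse ++
      (" , ".toList ++ (cipherB ((fmt8B (PySem.Int.mod (i + 1) 256)).reverse)
        (PySem.List.slice (PySem.List.pyRepeat key.toList (PySem.Int.floordiv 8 (key.toList.length : Int) + 4)) none (some 8))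
        et.toList ++ ['\n'])))]
  rw [join_nil_flatten, List.nil_append]
  rw [string_toList_00000000, loopA _ _ _ 0 [] (by norm_num)]
  apply congrArg
  rw [List.nil_append, pyRange256_len, PySem.List.pyRange_one, List.map_map]
  dsimp only
  have h256 : ((256 : Int) - 0).toNat = 256 := by decide
  rw [h256]
  apply congrArg
  refine List.map_congr_left ?_
  intro j _
  show lineA (resize_keyA key.toList) et.toList ((0 + j + 1) % 256) = _
  unfold lineA
  show _ = (fmt8B (PySem.Int.mod (0 + (j : Int) + 1) 256)).reverse ++
      (" , ".toList ++ (cipherB ((fmt8B (PySem.Int.mod (0 + (j : Int) + 1) 256)).reverse)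
        (resize_keyA key.toList) et.toList ++ ['\n']))
  rw [mod_cast_helper j]
  show leS ((0 + j + 1) % 256) ++ (" , ".toList ++ (encryptA (leS ((0 + j + 1) % 256)) (resize_keyA key.toList) et.toList ++ ['\n'])) =
    leS ((j + 1) % 256) ++ (" , ".toList ++ (cipherB (leS ((j + 1) % 256)) (resize_keyA key.toList) et.toList ++ ['\n']))
  rw [encryptA_eq_cipherB, resize_idem _ hk]
  norm_num
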